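-- pv_equiv track=rewrite | github.com/crocs-muni/sec-certs | src/sec_certs/model/references_nlp/segment_extractor.py | swap_and_filter_dict
-- ===== SOURCE A (Python) =====
-- from typing import Any, Literal
--
-- def swap_and_filter_dict(dct: dict[str, Any], filter_to_keys: set[str]):
--     new_dct: dict[str, set[str]] = {}
--     for key, val in dct.items():
--         if val in new_dct:
--             new_dct[val].add(key)
--         else:
--             new_dct[val] = {key}
--
--     return {key: frozenset(val) for key, val in new_dct.items() if key in filter_to_keys}
-- ===== SOURCE B (Python) =====
-- def swap_and_filter_dict(dct: dict, filter_to_keys: set):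
--     result = {}
--     for v in dct.values():
--         if v in filter_to_keys and v not in result:
--             result[v] = frozenset(k for k, val in dct.items() if val == v)
--     return result
-- ===== Notes on version B (the rewrite author's own statement) =====
-- stated objective: alternative
-- what changed: A inverts the dict in one pass by appending keys to per-value buckets and filters at the end; B is driven by the filter: at each value's first occurrence that passes the filter it builds the whole key set by a fresh scan of dct, so no buckets are maintained.
import Mathlib
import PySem

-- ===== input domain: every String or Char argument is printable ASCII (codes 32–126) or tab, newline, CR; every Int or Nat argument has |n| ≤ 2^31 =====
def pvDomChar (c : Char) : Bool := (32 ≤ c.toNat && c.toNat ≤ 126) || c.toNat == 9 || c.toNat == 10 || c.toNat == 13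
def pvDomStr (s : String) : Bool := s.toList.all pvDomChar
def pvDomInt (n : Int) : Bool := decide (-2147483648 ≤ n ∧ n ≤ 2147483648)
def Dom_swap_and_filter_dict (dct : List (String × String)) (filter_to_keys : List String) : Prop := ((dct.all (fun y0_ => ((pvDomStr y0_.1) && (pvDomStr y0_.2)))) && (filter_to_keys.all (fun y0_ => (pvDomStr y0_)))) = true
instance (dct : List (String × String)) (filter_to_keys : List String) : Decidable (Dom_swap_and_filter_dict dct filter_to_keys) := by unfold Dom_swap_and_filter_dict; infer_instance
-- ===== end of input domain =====

-- B replaces A's single-pass bucketed inversion with a filter-driven rewrite: for each value (first occurrence,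
-- if it passes the filter) it builds the key set by a fresh scan of dct — alternative decomposition, not faster.

-- ===== PORT A =====
def swap_and_filter_dict (dct : List (String × String)) (filter_to_keys : List String) : List (String × List String) :=
  ((dct.foldl (fun d kv =>
      match d.get? kv.2 with
      | some s => d.insert kv.2 (PySem.Set.add s kv.1)
      | none   => d.insert kv.2 [kv.1]) (PySem.Dict.empty : PySem.Dict String (PySem.Set String))).items).filter
    (fun p => filter_to_keys.contains p.1)

-- ===== PORT B =====
def swap_and_filter_dict_alt (dct : List (String × String)) (filter_to_keys : List String) : List (String × List String) :=
  (dct.foldl (fun res kv =>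
      if filter_to_keys.contains kv.2 && !(res.contains kv.2) then
        res.insert kv.2 (PySem.Set.ofList ((dct.filter (fun p => p.2 == kv.2)).map Prod.fst))
      else res) (PySem.Dict.empty : PySem.Dict String (PySem.Set String))).items

-- ===== PRECONDITION & SPEC =====
def Spec_swap_and_filter_dict (dct : List (String × String)) (filter_to_keys : List String) (out : List (String × List String)) : Prop := out = swap_and_filter_dict_alt dct filter_to_keys
instance (dct : List (String × String)) (filter_to_keys : List String) (out : List (String × List String)) : Decidable (Spec_swap_and_filter_dict dct filter_to_keys out) := by unfold Spec_swap_and_filter_dict; infer_instance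

-- ===== CLAIM (what is proved, stated in full; the proofs are below) =====
def Claim_equal_swap_and_filter_dict : Prop := ∀ (dct : List (String × String)) (filter_to_keys : List String), Dom_swap_and_filter_dict dct filter_to_keys → Spec_swap_and_filter_dict dct filter_to_keys (swap_and_filter_dict dct filter_to_keys)

-- ===== LEMMAS AND PROOFS =====

-- A's two branches are exactly `d[v] = d.get(v, set()) | {k}`, i.e. a modify.
lemma stepA_eq_modify (d : PySem.Dict String (PySem.Set String)) (kv : String × String) :
    (match d.get? kv.2 with
     | some s => d.insert kv.2 (PySem.Set.add s kv.1)
     | none   => d.insert kv.2 [kv.1]) = d.modify kv.2 [] (fun s => PySem.Set.add s kv.1) := by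
  cases h : d.get? kv.2 with
  | none => simp [PySem.Dict.modify, PySem.Dict.getD_eq_get?_getD, h, PySem.Set.add, PySem.Set.contains]
  | some s => simp [PySem.Dict.modify, PySem.Dict.getD_eq_get?_getD, h]

-- the bucket of value v after A's grouping loop
lemma foldl_modify_getD (l : List (String × String)) (d : PySem.Dict String (PySem.Set String)) (v : String) :
    (l.foldl (fun d kv => d.modify kv.2 [] (fun s => PySem.Set.add s kv.1)) d).getD v []
      = PySem.Set.update (d.getD v []) ((l.filter (fun p => p.2 == v)).map Prod.fst) := by
  induction l generalizing d with
  | nil => simp [PySem.Set.update]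
  | cons kv l ih =>
    simp only [List.foldl_cons, List.filter_cons, ih]
    by_cases h : kv.2 = v
    · subst h
      simp [PySem.Set.update_cons]
    · simp [PySem.Dict.getD_modify, h, Ne.symm h, beq_iff_eq]

-- A's grouped dict, as items
lemma groupA_items (dct : List (String × String)) :
    (dct.foldl (fun d kv => d.modify kv.2 [] (fun s => PySem.Set.add s kv.1))
        (PySem.Dict.empty : PySem.Dict String (PySem.Set String))).items
      = (PySem.Set.ofList (dct.map Prod.snd)).map
          (fun v => (v, PySem.Set.ofList ((dct.filter (fun p => p.2 == v)).map Prod.fst))) := by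
  have hkeys :
      (dct.foldl (fun d kv => d.modify kv.2 [] (fun s => PySem.Set.add s kv.1))
        (PySem.Dict.empty : PySem.Dict String (PySem.Set String))).keys
      = PySem.Set.ofList (dct.map Prod.snd) := by
    have := PySem.Dict.keys_foldl_modify_key dct (fun kv => kv.2) ([] : PySem.Set String)
      (fun _ kv => fun s => PySem.Set.add s kv.1) (PySem.Dict.empty)
    simpa [PySem.Dict.keys_empty, PySem.Set.update_nil_left] using this
  have hnd :
      (dct.foldl (fun d kv => d.modify kv.2 [] (fun s => PySem.Set.add s kv.1))
        (PySem.Dict.empty : PySem.Dict String (PySem.Set String))).keys.Nodup := by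
    exact PySem.Dict.nodup_keys_foldl_modify_key dct (fun kv => kv.2) ([] : PySem.Set String)
      (fun _ kv => fun s => PySem.Set.add s kv.1) (PySem.Dict.empty) (by simp [PySem.Dict.keys_empty])
  rw [PySem.Dict.items_eq_map_keys _ hnd ([] : PySem.Set String), hkeys]
  refine List.map_congr_left (fun v hv => ?_)
  rw [foldl_modify_getD]
  simp [PySem.Dict.getD_empty, PySem.Set.update_nil_left]

-- B's loop, processed prefix l (key sets always scanned from the full dct)
lemma altFold_items (dct : List (String × String)) (filter_to_keys : List String) (l : List (String × String)) :
    (l.foldl (fun res kv =>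
        if filter_to_keys.contains kv.2 && !(res.contains kv.2) then
          res.insert kv.2 (PySem.Set.ofList ((dct.filter (fun p => p.2 == kv.2)).map Prod.fst))
        else res) (PySem.Dict.empty : PySem.Dict String (PySem.Set String))).items
      = ((PySem.Set.ofList (l.map Prod.snd)).filter (fun v => filter_to_keys.contains v)).map
          (fun v => (v, PySem.Set.ofList ((dct.filter (fun p => p.2 == v)).map Prod.fst))) := by
  induction l using List.reverseRecOn with
  | nil => simp [PySem.Dict.empty, PySem.Set.ofList]
  | append_singleton l kv ih =>
    rw [List.foldl_append, List.foldl_cons, List.foldl_nil, List.map_append]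
    simp only [List.map_cons, List.map_nil]
    rw [PySem.Set.ofList_append_singleton]
    have hcont :
        ((l.foldl (fun res kv =>
            if filter_to_keys.contains kv.2 && !(res.contains kv.2) then
              res.insert kv.2 (PySem.Set.ofList ((dct.filter (fun p => p.2 == kv.2)).map Prod.fst))
            else res) (PySem.Dict.empty : PySem.Dict String (PySem.Set String))).contains kv.2) = true
          ↔ (kv.2 ∈ PySem.Set.ofList (l.map Prod.snd) ∧ filter_to_keys.contains kv.2 = true) := by
      rw [PySem.Dict.contains_iff_mem_keys]
      simp only [PySem.Dict.keys, ih, List.map_map]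
      simp [List.mem_filter, Function.comp_def, and_comm]
    by_cases hp : filter_to_keys.contains kv.2 = true
    · by_cases hm : kv.2 ∈ PySem.Set.ofList (l.map Prod.snd)
      · have hc : ((l.foldl (fun res kv =>
            if filter_to_keys.contains kv.2 && !(res.contains kv.2) then
              res.insert kv.2 (PySem.Set.ofList ((dct.filter (fun p => p.2 == kv.2)).map Prod.fst))
            else res) (PySem.Dict.empty : PySem.Dict String (PySem.Set String))).contains kv.2) = true :=
          hcont.mpr ⟨hm, hp⟩
        rw [PySem.Set.add_of_mem hm, hc]
        simp only [Bool.not_true, Bool.and_false]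
        rw [if_neg (by simp)]
        exact ih
      · have hc : ((l.foldl (fun res kv =>
            if filter_to_keys.contains kv.2 && !(res.contains kv.2) then
              res.insert kv.2 (PySem.Set.ofList ((dct.filter (fun p => p.2 == kv.2)).map Prod.fst))
            else res) (PySem.Dict.empty : PySem.Dict String (PySem.Set String))).contains kv.2) = false := by
          rcases Bool.eq_false_or_eq_true ((l.foldl (fun res kv =>
            if filter_to_keys.contains kv.2 && !(res.contains kv.2) then
              res.insert kv.2 (PySem.Set.ofList ((dct.filter (fun p => p.2 == kv.2)).map Prod.fst))
            else res) (PySem.Dict.empty : PySem.Dict String (PySem.Set String))).contains kv.2) with h | h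
          · exact absurd (hcont.mp h).1 hm
          · exact h

        rw [PySem.Set.add_of_not_mem hm, hc]
        simp only [Bool.not_false, Bool.and_true]
        rw [if_pos hp, PySem.Dict.items_insert_of_not_contains _ _ hc, ih, List.filter_append,
          List.filter_cons, List.filter_nil, if_pos hp, List.map_append, List.map_cons, List.map_nil]
    · rw [if_neg (fun hcond => hp ((Bool.and_eq_true _ _).mp hcond).1), ih]
      by_cases hm : kv.2 ∈ PySem.Set.ofList (l.map Prod.snd)
      · rw [PySem.Set.add_of_mem hm]
      · rw [PySem.Set.add_of_not_mem hm, List.filter_append, List.filter_cons, List.filter_nil,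
          if_neg hp, List.append_nil]

-- ===== VERDICT (by name: the statement is the Claim_ definition above) =====
theorem swap_and_filter_dict_spec : Claim_equal_swap_and_filter_dict := by
  intro dct filter_to_keys _
  unfold Spec_swap_and_filter_dict swap_and_filter_dict swap_and_filter_dict_alt
  have hA : (dct.foldl (fun d kv =>
      match d.get? kv.2 with
      | some s => d.insert kv.2 (PySem.Set.add s kv.1)
      | none   => d.insert kv.2 [kv.1]) (PySem.Dict.empty : PySem.Dict String (PySem.Set String)))
      = dct.foldl (fun d kv => d.modify kv.2 [] (fun s => PySem.Set.add s kv.1)) PySem.Dict.empty := by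
    exact List.foldl_ext _ _ _ (fun d kv _ => stepA_eq_modify d kv)
  rw [hA, groupA_items, altFold_items, List.filter_map]
  rfl
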